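-- pv_equiv track=rewrite | github.com/Massprod/leetcode-testing | leetcode_problems/p2027_minimum_moves_to_convert_string.py | minimum_move
-- ===== SOURCE A (Python) =====
-- def minimum_move(s: str) -> int:
--     # working_sol (95.30%, 23.52%) -> (27ms, 16.52mb)  time: O(s) | space: O(1)
--     out: int = 0
--     cur_seq: int = 0
--     x_used: bool = False
--     for char in s:
--         if 'X' == char:
--             x_used = True
--         if x_used:
--             cur_seq += 1
--             if cur_seq == 3:
--                 if x_used:
--                     out += 1
--                 cur_seq = 0
--                 x_used = False
--     if x_used and cur_seq:
--         out += 1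
--     return out
-- ===== SOURCE B (Python) =====
-- def minimum_move(s: str) -> int:
--     # Index-jumping scan: each 'X' costs one move and consumes a window of 3.
--     i = 0
--     count = 0
--     n = len(s)
--     while i < n:
--         if s[i] == 'X':
--             count += 1
--             i += 3
--         else:
--             i += 1
--     return count
-- ===== Notes on version B (the rewrite author's own statement) =====
-- stated objective: idiomatic
-- what changed: Replaces A's read-every-char state machine (cur_seq/x_used flags plus a post-loop fixup) with an index-jumping while loop that, on seeing an 'X', counts one move and skips the whole 3-character window.
import Mathlib
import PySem

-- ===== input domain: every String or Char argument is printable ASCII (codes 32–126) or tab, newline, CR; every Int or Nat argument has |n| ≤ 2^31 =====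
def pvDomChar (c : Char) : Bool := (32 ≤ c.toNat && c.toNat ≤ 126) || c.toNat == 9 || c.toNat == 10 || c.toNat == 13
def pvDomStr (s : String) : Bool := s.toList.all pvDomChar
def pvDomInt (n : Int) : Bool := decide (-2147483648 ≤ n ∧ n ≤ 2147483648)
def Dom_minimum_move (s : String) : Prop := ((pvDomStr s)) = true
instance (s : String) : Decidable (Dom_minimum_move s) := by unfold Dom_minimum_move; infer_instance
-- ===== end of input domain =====

-- B replaces A's read-every-char state machine with an index-jumping scan (idiomatic; same O(n) cost).


-- ===== PORT A =====
-- one step of A's for-loop body; state = (out, cur_seq, x_used)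
def pvStepA (st : Int × Int × Bool) (char : Char) : Int × Int × Bool :=
  let out := st.1
  let cur_seq := st.2.1
  let x_used := if char = 'X' then true else st.2.2
  if x_used then
    let cur_seq := cur_seq + 1
    if cur_seq = 3 then
      ((if x_used then out + 1 else out), 0, false)
    else (out, cur_seq, x_used)
  else (out, cur_seq, x_used)

def minimum_move (s : String) : Int :=
  let st := s.toList.foldl pvStepA (0, 0, false)
  if st.2.2 ∧ st.2.1 ≠ 0 then st.1 + 1 else st.1

-- ===== PORT B =====
-- B's while loop: i < n; on s[i] = 'X' count one move and jump i by 3, else by 1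
def pvGoB (cs : List Char) (i : Nat) (count : Int) : Int :=
  if h : i < cs.length then
    if cs[i] = 'X' then pvGoB cs (i + 3) (count + 1)
    else pvGoB cs (i + 1) count
  else count
termination_by cs.length - i

def minimum_move_alt (s : String) : Int := pvGoB s.toList 0 0

-- ===== PRECONDITION & SPEC =====
def Spec_minimum_move (s : String) (out : Int) : Prop := out = minimum_move_alt s
instance (s : String) (out : Int) : Decidable (Spec_minimum_move s out) := by unfold Spec_minimum_move; infer_instance

-- ===== CLAIM (what is proved, stated in full; the proofs are below) =====
def Claim_equal_minimum_move : Prop := ∀ (s : String), Dom_minimum_move s → Spec_minimum_move s (minimum_move s)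

-- ===== LEMMAS AND PROOFS =====

-- A's final fixup, as a function of the loop state
def pvFinish (st : Int × Int × Bool) : Int :=
  if st.2.2 ∧ st.2.1 ≠ 0 then st.1 + 1 else st.1

-- A's value from a fresh state, as a function of the remaining char list
def pvFinA (l : List Char) : Int := pvFinish (l.foldl pvStepA (0, 0, false))

-- A's fold is additive in the accumulated `out`
theorem pvFoldA_shift (l : List Char) (out cur : Int) (u : Bool) :
    l.foldl pvStepA (out, cur, u) =
      ((l.foldl pvStepA (0, cur, u)).1 + out, (l.foldl pvStepA (0, cur, u)).2) := by
  induction l generalizing out cur u with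
  | nil => simp
  | cons c rest ih =>
    simp only [List.foldl_cons, pvStepA]
    split_ifs <;> rw [ih] <;> (try conv_rhs => rw [ih]) <;> simp <;> omega

theorem pvFinish_shift (l : List Char) (out cur : Int) (u : Bool) :
    pvFinish (l.foldl pvStepA (out, cur, u)) =
      out + pvFinish (l.foldl pvStepA (0, cur, u)) := by
  rw [pvFoldA_shift]
  simp only [pvFinish]
  split_ifs <;> ring

-- finish from state (out, 2, true): one move closes, the rest restarts fresh
theorem pvFinA_state2 (l : List Char) (out : Int) :
    pvFinish (l.foldl pvStepA (out, 2, true)) = out + 1 + pvFinA (l.drop 1) := by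
  cases l with
  | nil => simp [pvFinish, pvFinA]
  | cons c rest =>
    have hstep : pvStepA (out, 2, true) c = (out + 1, 0, false) := by
      simp [pvStepA]
    simp only [List.foldl_cons, hstep, List.drop_succ_cons, List.drop_zero]
    rw [pvFinish_shift, pvFinA]

-- finish from state (out, 1, true): the next char (any char) moves to state 2
theorem pvFinA_state1 (l : List Char) (out : Int) :
    pvFinish (l.foldl pvStepA (out, 1, true)) = out + 1 + pvFinA (l.drop 2) := by
  cases l with
  | nil => simp [pvFinish, pvFinA]
  | cons c rest =>
    have hstep : pvStepA (out, 1, true) c = (out, 2, true) := by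
      simp [pvStepA]
    simp only [List.foldl_cons, hstep]
    simpa using pvFinA_state2 rest out

-- the recurrence B's scan satisfies, proved of A's value
theorem pvFinA_cons (c : Char) (rest : List Char) :
    pvFinA (c :: rest) =
      if c = 'X' then 1 + pvFinA (rest.drop 2) else pvFinA rest := by
  by_cases hc : c = 'X'
  · have hstep : pvStepA (0, 0, false) c = (0, 1, true) := by
      simp [pvStepA, hc]
    rw [pvFinA, List.foldl_cons, hstep, pvFinA_state1, if_pos hc]
    ring
  · have hstep : pvStepA (0, 0, false) c = (0, 0, false) := by
      simp [pvStepA, hc]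
    rw [pvFinA, List.foldl_cons, hstep, if_neg hc, pvFinA]

-- B's index loop computes count plus A's value on the remaining suffix
theorem pvGoB_eq (cs : List Char) (i : Nat) (count : Int) :
    pvGoB cs i count = count + pvFinA (cs.drop i) := by
  fun_induction pvGoB cs i count with
  | case1 i count h hx ih =>
    have hd : cs.drop i = cs[i] :: cs.drop (i + 1) := List.drop_eq_getElem_cons h
    rw [ih, hd, pvFinA_cons, if_pos hx, List.drop_drop]
    ring_nf
  | case2 i count h hx ih =>
    have hd : cs.drop i = cs[i] :: cs.drop (i + 1) := List.drop_eq_getElem_cons h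
    rw [ih, hd, pvFinA_cons, if_neg hx]
  | case3 i count h =>
    rw [List.drop_of_length_le (by omega)]
    simp [pvFinA, pvFinish]

-- ===== VERDICT (by name: the statement is the Claim_ definition above) =====
theorem minimum_move_spec : Claim_equal_minimum_move := by
  intro s _
  show minimum_move s = minimum_move_alt s
  rw [minimum_move_alt, pvGoB_eq]
  simp [minimum_move, pvFinA, pvFinish]
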